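-- pv_equiv track=rewrite | github.com/paulacalusinska/programming_lessons | group_list_by_sth.py | group_by_family
-- ===== SOURCE A (Python) =====
-- def group_by_family(list_of_people):
--     families = {}
--     for e in list_of_people:
--         names = e.split()
--         name = names[0]
--         surname = names[1]
--         if surname not in families:
--             families[surname] = [name]
--         else:
--             family_members = families[surname]
--             family_members.append(name)
--     return families
-- ===== SOURCE B (Python) =====
-- def group_by_family(list_of_people):
--     # Different algorithm: extract (surname, name) pairs once, then group them
--     # by recursive partitioning (take the first surname, gather all its names,
--     # recurse on the remaining pairs).  Same result order as A: surnames in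
--     # first-appearance order, names in original order.
--     pairs = [(ws[1], ws[0]) for ws in (p.split() for p in list_of_people)]
--
--     def go(ps):
--         if not ps:
--             return {}
--         surname, name = ps[0]
--         rest = ps[1:]
--         d = {surname: [name] + [n for s, n in rest if s == surname]}
--         d.update(go([q for q in rest if q[0] != surname]))
--         return d
--
--     return go(pairs)
-- ===== Notes on version B (the rewrite author's own statement) =====
-- stated objective: alternative
-- what changed: A builds the dict incrementally, testing membership and appending per person; B first extracts all (surname, name) pairs, then groups them by recursive partitioning: take the first pair's surname, gather all its names in one scan, and recurse on the pairs with other surnames.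
import Mathlib
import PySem

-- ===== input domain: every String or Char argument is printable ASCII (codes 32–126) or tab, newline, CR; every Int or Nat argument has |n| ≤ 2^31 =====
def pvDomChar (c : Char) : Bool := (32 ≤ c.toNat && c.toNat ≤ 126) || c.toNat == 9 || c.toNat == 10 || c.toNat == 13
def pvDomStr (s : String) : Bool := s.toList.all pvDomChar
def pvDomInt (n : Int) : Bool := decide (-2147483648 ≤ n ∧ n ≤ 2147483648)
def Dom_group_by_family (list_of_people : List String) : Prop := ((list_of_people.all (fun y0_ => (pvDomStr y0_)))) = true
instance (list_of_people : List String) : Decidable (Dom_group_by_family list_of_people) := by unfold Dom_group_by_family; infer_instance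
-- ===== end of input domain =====

-- B replaces A's incremental dict building by extract-pairs-then-recursive-partition grouping
-- (same result; 'alternative' objective, no speed claim).

-- ===== PORT A =====
-- A: one pass; per person split, take name/surname, insert new key or append to the existing list.
def group_by_family (list_of_people : List String) : List (String × List String) :=
  (list_of_people.foldl (fun families e =>
      let names := PySem.Str.split₀ e
      match PySem.List.pyGet? names 0, PySem.List.pyGet? names 1 with
      | some name, some surname =>
          if families.contains surname = false then
            families.insert surname [name]
          else
            families.insert surname (families.getD surname [] ++ [name])
      | _, _ => families   -- Python raises IndexError here; such inputs are excluded by Pre_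
    ) PySem.Dict.empty).items

-- ===== PORT B =====
-- B: pairs = [(ws[1], ws[0]) for ws in (p.split() for p in list_of_people)]
def pvPairB (p : String) : String × String :=
  let ws := PySem.Str.split₀ p
  match PySem.List.pyGet? ws 1 with
  | some surname =>
      match PySem.List.pyGet? ws 0 with
      | some name => (surname, name)
      | none => ("", "")   -- Python raises IndexError here; excluded by Pre_
  | none => ("", "")       -- Python raises IndexError here; excluded by Pre_

-- B's recursive go: head surname, gather its names from the rest, recurse on the other pairs.
-- d.update(go(...)): go's keys all differ from the head surname, so update appends = cons here.
def pvGo : List (String × String) → List (String × List String)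
  | [] => []
  | q :: rest =>
      (q.1, q.2 :: (rest.filter (fun r => r.1 == q.1)).map (fun r => r.2)) ::
      pvGo (rest.filter (fun r => r.1 != q.1))
  termination_by ps => ps.length
  decreasing_by
    simp
    exact le_trans (List.length_filter_le _ rest.attach) (le_of_eq List.length_attach)

def group_by_family_alt (list_of_people : List String) : List (String × List String) :=
  pvGo (list_of_people.map pvPairB)

-- ===== PRECONDITION & SPEC =====
-- Pre_ excludes exactly the inputs where some person has fewer than two whitespace-separated
-- words: there Python's names[1] (and possibly names[0]) raises IndexError in both A and B.
def Pre_group_by_family (list_of_people : List String) : Prop :=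
  ∀ e ∈ list_of_people, 2 ≤ (PySem.Str.split₀ e).length
instance (list_of_people : List String) : Decidable (Pre_group_by_family list_of_people) := by
  unfold Pre_group_by_family; infer_instance

def pvWitness_group_by_family : List String := ["Ann Smith", "Bob Smith", "Cy Jones"]

def Spec_group_by_family (list_of_people : List String) (out : List (String × List String)) : Prop := out = group_by_family_alt list_of_people
instance (list_of_people : List String) (out : List (String × List String)) : Decidable (Spec_group_by_family list_of_people out) := by unfold Spec_group_by_family; infer_instance

-- ===== CLAIM (what is proved, stated in full; the proofs are below) =====
def Claim_equal_group_by_family : Prop := ∀ (list_of_people : List String), Dom_group_by_family list_of_people → Pre_group_by_family list_of_people → Spec_group_by_family list_of_people (group_by_family list_of_people)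

-- ===== LEMMAS AND PROOFS =====

lemma pvGo_cons (q : String × String) (rest : List (String × String)) :
    pvGo (q :: rest) = (q.1, q.2 :: (rest.filter (fun r => r.1 == q.1)).map (fun r => r.2)) ::
      pvGo (rest.filter (fun r => r.1 != q.1)) := by simp only [pvGo]

-- the body of A's loop, seen as a function of the extracted (surname, name) pair
def pvStep (d : PySem.Dict String (List String)) (q : String × String) : PySem.Dict String (List String) :=
  if d.contains q.1 = false then d.insert q.1 [q.2] else d.insert q.1 (d.getD q.1 [] ++ [q.2])

lemma pvStep_nodup (d : PySem.Dict String (List String)) (q : String × String)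
    (h : d.keys.Nodup) : (pvStep d q).keys.Nodup := by
  unfold pvStep; split <;> exact PySem.Dict.nodup_keys_insert _ _ _ h

-- invariant of A's loop: the items of the fold are the old items, each value extended with the
-- matching names from ps, followed by B's grouping of the pairs whose surname is new to d.
lemma pvFold_items (ps : List (String × String)) :
    ∀ (d : PySem.Dict String (List String)), d.keys.Nodup →
    (ps.foldl pvStep d).items
      = d.items.map (fun kv => (kv.1, kv.2 ++ (ps.filter (fun r => r.1 == kv.1)).map (fun r => r.2)))
        ++ pvGo (ps.filter (fun r => !d.contains r.1)) := by
  induction ps with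
  | nil => intro d _; simp [pvGo]
  | cons q ps ih =>
    intro d hnd
    have hmain := ih (pvStep d q) (pvStep_nodup d q hnd)
    rw [List.foldl_cons, hmain]
    by_cases hc : d.contains q.1 = true
    · -- existing surname: the entry at q.1 gets q.2 appended (in place)
      have hstep : pvStep d q = d.insert q.1 (d.getD q.1 [] ++ [q.2]) := by
        unfold pvStep; simp [hc]
      rw [hstep]
      rw [PySem.Dict.items_insert_of_contains d _ hc]
      rw [List.map_map]
      congr 1
      · apply List.map_congr_left
        intro kv hkv
        by_cases hk : kv.1 = q.1
        · have : (q.1, kv.2) ∈ d.items := by rw [← hk]; exact hkv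
          have hget : d.getD q.1 [] = kv.2 := PySem.Dict.getD_of_mem_items d this hnd []
          simp [Function.comp, hk, hget]
        · have hne : (kv.1 == q.1) = false := by simp [hk]
          have hne' : (q.1 == kv.1) = false := by
            simp only [beq_eq_false_iff_ne]; exact fun h => hk h.symm
          simp [Function.comp, hne, hne']
      · rw [List.filter_cons, if_neg (by simp [hc] : ¬ ((!d.contains q.1) = true))]
        congr 1
        apply List.filter_congr
        intro r _
        rw [PySem.Dict.contains_insert]
        by_cases hr : r.1 = q.1
        · simp [hr, hc]
        · simp [hr]
    · -- new surname: (q.1, [q.2]) is appended at the end of d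
      have hc' : d.contains q.1 = false := by simpa using hc
      have hstep : pvStep d q = d.insert q.1 [q.2] := by unfold pvStep; simp [hc']
      rw [hstep]
      rw [PySem.Dict.items_insert_of_not_contains d _ hc']
      rw [List.map_append]
      rw [List.filter_cons, if_pos (by simp [hc'] : (!d.contains q.1) = true)]
      rw [pvGo_cons]
      rw [List.append_assoc]
      congr 1
      · apply List.map_congr_left
        intro kv hkv
        have hmem : kv.1 ∈ d.keys := PySem.Dict.mem_keys_of_mem_items d hkv
        have hck : d.contains kv.1 = true := (PySem.Dict.contains_iff_mem_keys d kv.1).mpr hmem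
        have hne : (q.1 == kv.1) = false := by
          simp only [beq_eq_false_iff_ne]
          intro h; rw [h, hck] at hc'; exact absurd hc' (by simp)
        rw [List.filter_cons, if_neg (by simp [hne] : ¬ ((q.1 == kv.1) = true))]
      · simp only [List.map_cons, List.map_nil, List.singleton_append]
        congr 1
        · -- head entry: filtering ¬contains then == q.1 is just == q.1 (q.1 is new to d)
          have hff : ps.filter (fun a => a.1 == q.1 && !d.contains a.1)
              = ps.filter (fun r => r.1 == q.1) :=
            List.filter_congr (by intro r _; by_cases hr : r.1 = q.1 <;> simp [hr, hc'])
          rw [List.filter_filter, hff]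
        · -- recursive argument: the two composed filters agree pointwise
          rw [List.filter_filter]
          congr 1
          apply List.filter_congr
          intro r _
          rw [PySem.Dict.contains_insert]
          by_cases hr : r.1 = q.1 <;> simp [hr, bne]

-- under Pre_, A's loop body applied to e is pvStep at the extracted pair pvPairB e
lemma pvFoldA_eq (l : List String) (hpre : ∀ e ∈ l, 2 ≤ (PySem.Str.split₀ e).length) :
    ∀ d : PySem.Dict String (List String),
    l.foldl (fun families e =>
      let names := PySem.Str.split₀ e
      match PySem.List.pyGet? names 0, PySem.List.pyGet? names 1 with
      | some name, some surname =>
          if families.contains surname = false then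
            families.insert surname [name]
          else
            families.insert surname (families.getD surname [] ++ [name])
      | _, _ => families) d
      = (l.map pvPairB).foldl pvStep d := by
  induction l with
  | nil => intro d; simp
  | cons e l ih =>
    intro d
    have he : 2 ≤ (PySem.Str.split₀ e).length := hpre e (List.mem_cons_self)
    obtain ⟨a, b, tl, hsplit⟩ : ∃ a b tl, PySem.Str.split₀ e = a :: b :: tl := by
      match hs : PySem.Str.split₀ e with
      | [] => rw [hs] at he; simp at he
      | [x] => rw [hs] at he; simp at he
      | x :: y :: tl => exact ⟨x, y, tl, rfl⟩
    have hget0 : PySem.List.pyGet? (PySem.Str.split₀ e) 0 = some a := by rw [hsplit]; simp [pysem]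
    have hget1 : PySem.List.pyGet? (PySem.Str.split₀ e) 1 = some b := by rw [hsplit]; simp [pysem]
    have hpair : pvPairB e = (b, a) := by simp only [pvPairB, hget1, hget0]
    rw [List.map_cons, List.foldl_cons, List.foldl_cons]
    have hbody : ∀ d' : PySem.Dict String (List String),
        (let names := PySem.Str.split₀ e
         match PySem.List.pyGet? names 0, PySem.List.pyGet? names 1 with
         | some name, some surname =>
             if d'.contains surname = false then
               d'.insert surname [name]
             else
               d'.insert surname (d'.getD surname [] ++ [name])
         | _, _ => d') = pvStep d' (pvPairB e) := by
      intro d'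
      rw [hpair]
      simp only [hget0, hget1]
      rfl
    rw [hbody d]
    exact ih (fun x hx => hpre x (List.mem_cons_of_mem _ hx)) _

-- ===== VERDICT (by name: the statement is the Claim_ definition above) =====
theorem group_by_family_spec : Claim_equal_group_by_family := by
  intro l _ hpre
  unfold Spec_group_by_family group_by_family group_by_family_alt
  rw [pvFoldA_eq l hpre PySem.Dict.empty]
  rw [pvFold_items (l.map pvPairB) PySem.Dict.empty PySem.Dict.nodup_keys_empty]
  simp [PySem.Dict.empty]
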